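-- pv_equiv track=rewrite | github.com/hxssgaa/GraftNet | pullnet_main.py | inference_answer_helper
-- ===== SOURCE A (Python) =====
-- def inference_answer_helper(entity, pred_path, facts, visited):
--     if not pred_path:
--         return {entity}
--     if entity in visited or entity not in facts or pred_path[0] not in facts[entity]:
--         return set()
--     visited.add(entity)
--     res = set()
--     for neighbor in facts[entity][pred_path[0]]:
--         res |= inference_answer_helper(neighbor, pred_path[1:], facts, visited)
--     return res
-- ===== SOURCE B (Python) =====
-- def inference_answer_helper(entity, pred_path, facts, visited):
--     # Iterative DFS with an explicit stack of (entity, remaining path) pairs;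
--     # neighbors are pushed in reversed order and the visited/guard check is done
--     # at pop time, so the traversal (and visited mutation) is the recursion's
--     # exact pre-order.
--     res = set()
--     stack = [(entity, pred_path)]
--     while stack:
--         ent, path = stack.pop()
--         if not path:
--             res.add(ent)
--         elif ent in visited or ent not in facts or path[0] not in facts[ent]:
--             continue
--         else:
--             visited.add(ent)
--             rest = path[1:]
--             stack.extend((n, rest) for n in reversed(facts[ent][path[0]]))
--     return res
-- ===== Notes on version B (the rewrite author's own statement) =====
-- stated objective: alternative
-- what changed: Replaces A's recursive DFS (one recursive call per neighbor, union of sub-results) by an iterative loop over an explicit stack of (entity, remaining-path) pairs with reversed pushes and the visited/guard check done at pop time, reproducing the recursion's exact pre-order and visited-set pruning.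
import Mathlib
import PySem

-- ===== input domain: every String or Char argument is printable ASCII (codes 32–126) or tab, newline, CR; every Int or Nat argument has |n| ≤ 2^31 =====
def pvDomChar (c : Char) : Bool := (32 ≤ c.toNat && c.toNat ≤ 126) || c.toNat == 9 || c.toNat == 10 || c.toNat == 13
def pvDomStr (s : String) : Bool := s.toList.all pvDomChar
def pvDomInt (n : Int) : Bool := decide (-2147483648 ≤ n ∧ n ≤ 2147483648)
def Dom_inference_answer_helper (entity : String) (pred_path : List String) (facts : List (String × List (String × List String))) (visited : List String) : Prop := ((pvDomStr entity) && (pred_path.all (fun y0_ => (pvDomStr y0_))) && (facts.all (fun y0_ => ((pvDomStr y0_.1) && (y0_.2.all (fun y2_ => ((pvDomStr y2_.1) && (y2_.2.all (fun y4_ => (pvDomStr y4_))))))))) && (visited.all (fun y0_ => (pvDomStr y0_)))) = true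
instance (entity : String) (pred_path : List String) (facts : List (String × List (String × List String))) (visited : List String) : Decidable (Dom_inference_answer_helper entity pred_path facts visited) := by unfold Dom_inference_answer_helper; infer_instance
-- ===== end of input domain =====

-- B replaces A's recursive DFS by an iterative one over an explicit stack of (entity, remaining-path)
-- pairs (reversed pushes, guard checked at pop), preserving the recursion's exact pre-order; both A and B
-- mutate the Python 'visited' set argument identically, and the equivalence proved is about the RETURN value.

-- ===== PORT A =====
-- A's recursion mutates the shared 'visited' set; the port threads it explicitly,
-- returning (result set, visited set); the entry point returns the first component.
def goA (facts : List (String × List (String × List String))) :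
    List String → String → PySem.Set String → PySem.Set String × PySem.Set String
  | [], entity, visited => (PySem.Set.ofList [entity], visited)
  | p :: rest, entity, visited =>
    if PySem.Set.contains visited entity
        || !((PySem.Dict.mk facts).contains entity)
        || !((PySem.Dict.mk ((PySem.Dict.mk facts).getD entity [])).contains p) then
      (PySem.Set.empty, visited)
    else
      ((PySem.Dict.mk ((PySem.Dict.mk facts).getD entity [])).getD p []).foldl
        (fun st n =>
          let r := goA facts rest n st.2
          (PySem.Set.union st.1 r.1, r.2))
        (PySem.Set.empty, PySem.Set.add visited entity)

def inference_answer_helper (entity : String) (pred_path : List String) (facts : List (String × List (String × List String))) (visited : List String) : List String :=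
  (goA facts pred_path entity visited).1

-- ===== PORT B =====
-- Two counting lemmas cited by name in loopB's decreasing_by (termination of the while loop:
-- each expansion marks a previously unvisited fact key as visited).
theorem pv_filter_len_le (l : List String) (p q : String → Bool)
    (h : ∀ x, q x = true → p x = true) : (l.filter q).length ≤ (l.filter p).length := by
  induction l with
  | nil => simp
  | cons a l ih =>
    by_cases hq : q a = true
    · simp [hq, h a hq]; omega
    · by_cases hp : p a = true <;>
        simp [hq, hp, Bool.not_eq_true] at * <;> omega

theorem pv_filter_len_lt (l : List String) (p q : String → Bool)
    (h : ∀ x, q x = true → p x = true) (a : String) (ha : a ∈ l)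
    (hp : p a = true) (hq : q a = false) :
    (l.filter q).length < (l.filter p).length := by
  induction l with
  | nil => cases ha
  | cons b l ih =>
    rcases List.mem_cons.mp ha with rfl | hmem
    · have hle := pv_filter_len_le l p q h
      simp [hp, hq]; omega
    · have hlt := ih hmem
      by_cases hqb : q b = true
      · simp [hqb, h b hqb]; omega
      · by_cases hpb : p b = true <;>
          simp [hqb, hpb, Bool.not_eq_true] at * <;> omega

-- Source B's while loop over the stack; the head of the Lean list is the END of the Python list
-- (its pop() side), so 'extend(reversed(neighbor pairs))' is prepending the neighbor pairs in order.
def loopB (facts : List (String × List (String × List String))) :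
    List (String × List String) → PySem.Set String → PySem.Set String → PySem.Set String
  | [], _, res => res
  | (ent, path) :: stack, visited, res =>
    match path with
    | [] => loopB facts stack visited (PySem.Set.add res ent)
    | p :: rest =>
      if h : PySem.Set.contains visited ent
          || !((PySem.Dict.mk facts).contains ent)
          || !((PySem.Dict.mk ((PySem.Dict.mk facts).getD ent [])).contains p) then
        loopB facts stack visited res
      else
        loopB facts
          (((PySem.Dict.mk ((PySem.Dict.mk facts).getD ent [])).getD p []).map (fun n => (n, rest)) ++ stack)
          (PySem.Set.add visited ent) res
  termination_by st visited _ =>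
    (((facts.map Prod.fst).filter (fun k => !(PySem.Set.contains visited k))).length, st.length)
  decreasing_by
  · apply Prod.Lex.right; simp
  · apply Prod.Lex.right; simp
  · apply Prod.Lex.left
    have h' : (PySem.Set.contains visited ent
        || !((PySem.Dict.mk facts).contains ent)
        || !((PySem.Dict.mk ((PySem.Dict.mk facts).getD ent [])).contains p)) = false :=
      Bool.eq_false_iff.mpr h
    have h1 := (Bool.or_eq_false_iff.mp h').1
    have hvis := (Bool.or_eq_false_iff.mp h1).1
    have hfacts : (PySem.Dict.mk facts).contains ent = true := by
      have := (Bool.or_eq_false_iff.mp h1).2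
      simpa using this
    have hmem : ent ∈ facts.map Prod.fst := by
      have := (PySem.Dict.contains_iff_mem_keys (PySem.Dict.mk facts) ent).mp hfacts
      simpa [PySem.Dict.keys] using this
    have hnv : ent ∉ visited := by
      intro hc
      rw [(PySem.Set.contains_iff visited ent).mpr hc] at hvis
      simp at hvis
    refine pv_filter_len_lt _ _ _ ?himp ent hmem ?hp ?hq
    case himp =>
      intro x hx
      rw [PySem.Set.add_of_not_mem hnv] at hx
      simp only [PySem.Set.contains_eq_listContains, Bool.not_eq_true'] at hx ⊢
      simp only [List.contains_append, Bool.or_eq_false_iff] at hx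
      exact hx.1
    case hp => simpa using hnv
    case hq =>
      rw [PySem.Set.add_of_not_mem hnv]
      simp [PySem.Set.contains_eq_listContains]

def inference_answer_helper_alt (entity : String) (pred_path : List String) (facts : List (String × List (String × List String))) (visited : List String) : List String :=
  loopB facts [(entity, pred_path)] visited PySem.Set.empty

-- ===== PRECONDITION & SPEC =====
def Spec_inference_answer_helper (entity : String) (pred_path : List String) (facts : List (String × List (String × List String))) (visited : List String) (out : List String) : Prop := out = inference_answer_helper_alt entity pred_path facts visited
instance (entity : String) (pred_path : List String) (facts : List (String × List (String × List String))) (visited : List String) (out : List String) : Decidable (Spec_inference_answer_helper entity pred_path facts visited out) := by unfold Spec_inference_answer_helper; infer_instance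

-- ===== CLAIM (what is proved, stated in full; the proofs are below) =====
def Claim_equal_inference_answer_helper : Prop := ∀ (entity : String) (pred_path : List String) (facts : List (String × List (String × List String))) (visited : List String), Dom_inference_answer_helper entity pred_path facts visited → Spec_inference_answer_helper entity pred_path facts visited (inference_answer_helper entity pred_path facts visited)

-- ===== LEMMAS AND PROOFS =====

-- The DFS "output stream": the answers in discovery order (with repetitions), plus the final visited set.
def strm (facts : List (String × List (String × List String))) :
    List String → String → PySem.Set String → List String × PySem.Set String
  | [], e, v => ([e], v)
  | p :: rest, e, v =>
    if PySem.Set.contains v e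
        || !((PySem.Dict.mk facts).contains e)
        || !((PySem.Dict.mk ((PySem.Dict.mk facts).getD e [])).contains p) then
      ([], v)
    else
      ((PySem.Dict.mk ((PySem.Dict.mk facts).getD e [])).getD p []).foldl
        (fun st n =>
          let r := strm facts rest n st.2
          (st.1 ++ r.1, r.2))
        ([], PySem.Set.add v e)

def streamAll (facts : List (String × List (String × List String))) :
    List (String × List String) → PySem.Set String → List String × PySem.Set String
  | [], v => ([], v)
  | (e, pp) :: st, v =>
    let r := strm facts pp e v
    let s := streamAll facts st r.2
    (r.1 ++ s.1, s.2)

theorem pv_update_ofList {α : Type} [BEq α] [LawfulBEq α] (c : List α) (s : PySem.Set α) :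
    PySem.Set.update s (PySem.Set.ofList c) = PySem.Set.update s c := by
  induction c using List.reverseRecOn generalizing s with
  | nil => rfl
  | append_singleton c x ih =>
    rw [PySem.Set.ofList_append_singleton, PySem.Set.update_append]
    by_cases hx : x ∈ PySem.Set.ofList c
    · rw [PySem.Set.add_of_mem hx, ih]
      have hxc : x ∈ PySem.Set.update s c := by
        rw [PySem.Set.mem_update]; exact Or.inr ((PySem.Set.mem_ofList c x).mp hx)
      show PySem.Set.update s c = PySem.Set.add (PySem.Set.update s c) x
      rw [PySem.Set.add_of_mem hxc]
    · rw [PySem.Set.add_of_not_mem hx, PySem.Set.update_append, ih]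

theorem streamAll_append (facts : List (String × List (String × List String)))
    (s1 s2 : List (String × List String)) (v : PySem.Set String) :
    streamAll facts (s1 ++ s2) v =
      ((streamAll facts s1 v).1 ++ (streamAll facts s2 (streamAll facts s1 v).2).1,
       (streamAll facts s2 (streamAll facts s1 v).2).2) := by
  induction s1 generalizing v with
  | nil => simp [streamAll]
  | cons hd tl ih =>
    obtain ⟨e, pp⟩ := hd
    simp [streamAll, ih, List.append_assoc]

theorem strm_foldl (facts : List (String × List (String × List String)))
    (rest : List String) (nbrs : List String) (L : List String) (v : PySem.Set String) :
    nbrs.foldl (fun st n => let r := strm facts rest n st.2; (st.1 ++ r.1, r.2)) (L, v)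
      = (L ++ (streamAll facts (nbrs.map (fun n => (n, rest))) v).1,
         (streamAll facts (nbrs.map (fun n => (n, rest))) v).2) := by
  induction nbrs generalizing L v with
  | nil => simp [streamAll]
  | cons n nbrs ih =>
    simp only [List.foldl_cons, List.map_cons, streamAll, ih, List.append_assoc]

theorem goA_eq_strm (facts : List (String × List (String × List String)))
    (pp : List String) (e : String) (v : PySem.Set String) :
    goA facts pp e v = (PySem.Set.ofList (strm facts pp e v).1, (strm facts pp e v).2) := by
  induction pp generalizing e v with
  | nil => rfl
  | cons p rest ih =>
    rw [goA, strm]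
    split
    · rfl
    · rw [strm_foldl]
      have fold_eq : ∀ (nbrs : List String) (L : List String) (w : PySem.Set String),
          nbrs.foldl (fun st n => let r := goA facts rest n st.2;
              (PySem.Set.union st.1 r.1, r.2)) (PySem.Set.ofList L, w)
            = (PySem.Set.ofList (L ++ (streamAll facts (nbrs.map (fun n => (n, rest))) w).1),
               (streamAll facts (nbrs.map (fun n => (n, rest))) w).2) := by
        intro nbrs
        induction nbrs with
        | nil => intro L w; simp [streamAll]
        | cons n nbrs ihn =>
          intro L w
          rw [List.foldl_cons]
          have hstep : (let r := goA facts rest n (PySem.Set.ofList L, w).2;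
                ((PySem.Set.ofList L, w).1.union r.1, r.2))
              = (PySem.Set.ofList (L ++ (strm facts rest n w).1), (strm facts rest n w).2) := by
            simp only [ih]
            refine Prod.ext ?_ rfl
            show PySem.Set.update (PySem.Set.ofList L)
                (PySem.Set.ofList (strm facts rest n w).1) = _
            rw [pv_update_ofList, ← PySem.Set.ofList_append]
          rw [hstep, ihn]
          simp [streamAll, List.append_assoc]
      have := fold_eq ((PySem.Dict.mk ((PySem.Dict.mk facts).getD e [])).getD p []) []
        (PySem.Set.add v e)
      simpa using this

theorem loopB_eq_streamAll (facts : List (String × List (String × List String)))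
    (st : List (String × List String)) (v res : PySem.Set String) :
    loopB facts st v res = PySem.Set.update res (streamAll facts st v).1 := by
  induction st, v, res using loopB.induct facts with
  | case1 v res =>
    rw [loopB.eq_def]
    rfl
  | case2 ent stack v res ih =>
    rw [loopB, ih]
    show _ = PySem.Set.update res (streamAll facts ((ent, []) :: stack) v).1
    rw [streamAll]
    simp only [strm]
    rw [List.singleton_append, PySem.Set.update_cons]
  | case3 ent stack v res p rest h ih =>
    rw [loopB, dif_pos h, ih]
    have hstrm : strm facts (p :: rest) ent v = ([], v) := by
      rw [strm, if_pos h]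
    show _ = PySem.Set.update res (streamAll facts ((ent, p :: rest) :: stack) v).1
    rw [streamAll, hstrm]
    rfl
  | case4 ent stack v res p rest h ih =>
    rw [loopB, dif_neg h, ih, streamAll_append]
    have hstrm : strm facts (p :: rest) ent v
        = (streamAll facts ((((PySem.Dict.mk ((PySem.Dict.mk facts).getD ent [])).getD p []).map (fun n => (n, rest)))) (PySem.Set.add v ent)) := by
      rw [strm, if_neg h, strm_foldl]
      simp
    show _ = PySem.Set.update res (streamAll facts ((ent, p :: rest) :: stack) v).1
    rw [streamAll, hstrm]

-- ===== VERDICT (by name: the statement is the Claim_ definition above) =====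
theorem inference_answer_helper_spec : Claim_equal_inference_answer_helper := by
  intro entity pred_path facts visited _
  show inference_answer_helper entity pred_path facts visited
      = inference_answer_helper_alt entity pred_path facts visited
  rw [inference_answer_helper, inference_answer_helper_alt, goA_eq_strm,
    loopB_eq_streamAll]
  simp only [streamAll, List.append_nil]
  rfl
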